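-- pv_equiv track=rewrite | github.com/badranX/yaml-datasets | yamld/dataset_parser.py | _skip_to_dataset
-- ===== SOURCE A (Python) =====
-- def _skip_to_dataset(lines):
--     #skip meta data if any
--     tmp = []
--     is_first = True
--     for line in lines:
--         strp_line = line.strip()
--         if strp_line:
--             if is_first and strp_line.startswith('-'):
--                 tmp.append(line)
--             is_first = False
--         else:
--            continue
--         if strp_line.startswith('dataset'):
--             break
--     return tmp
-- ===== SOURCE B (Python) =====
-- def _skip_to_dataset(lines):
--     # Only the first line with nonempty strip can affect the result.
--     for line in lines:
--         strp = line.strip()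
--         if strp:
--             return [line] if strp.startswith('-') else []
--     return []
-- ===== Notes on version B (the rewrite author's own statement) =====
-- stated objective: simpler
-- what changed: B returns directly from the first nonempty-stripped line ([line] iff it startswith '-'), eliminating A's accumulator, is_first flag, 'dataset' break and the inert trailing scan; the early return also skips the rest of the input.
import Mathlib
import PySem

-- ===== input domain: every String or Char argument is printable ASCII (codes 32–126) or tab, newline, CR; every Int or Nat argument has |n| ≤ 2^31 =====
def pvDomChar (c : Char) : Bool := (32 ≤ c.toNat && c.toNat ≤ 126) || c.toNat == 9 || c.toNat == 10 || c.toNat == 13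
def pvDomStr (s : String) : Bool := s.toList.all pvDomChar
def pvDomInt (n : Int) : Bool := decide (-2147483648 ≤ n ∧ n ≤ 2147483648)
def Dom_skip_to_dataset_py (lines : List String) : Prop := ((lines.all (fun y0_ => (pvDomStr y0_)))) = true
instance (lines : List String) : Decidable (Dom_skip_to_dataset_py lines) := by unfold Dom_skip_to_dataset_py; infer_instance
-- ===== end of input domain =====

-- B: return directly from the first nonempty-stripped line; drops A's accumulator, flag and break (simpler).

-- ===== PORT A =====
def skipA_go : List String → List String → Bool → List String
  | [], tmp, _ => tmp
  | line :: rest, tmp, is_first =>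
    let strp := PySem.Str.strip line
    if strp ≠ "" then
      let tmp' := if is_first && PySem.Str.startswith strp "-" then tmp ++ [line] else tmp
      if PySem.Str.startswith strp "dataset" then tmp'
      else skipA_go rest tmp' false
    else skipA_go rest tmp is_first

def skip_to_dataset_py (lines : List String) : List String :=
  skipA_go lines [] true

-- ===== PORT B =====
def skip_to_dataset_py_alt : List String → List String
  | [] => []
  | line :: rest =>
    let strp := PySem.Str.strip line
    if strp ≠ "" then (if PySem.Str.startswith strp "-" then [line] else [])
    else skip_to_dataset_py_alt rest

-- ===== PRECONDITION & SPEC =====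
def Spec_skip_to_dataset_py (lines : List String) (out : List String) : Prop := out = skip_to_dataset_py_alt lines
instance (lines : List String) (out : List String) : Decidable (Spec_skip_to_dataset_py lines out) := by unfold Spec_skip_to_dataset_py; infer_instance

-- ===== CLAIM (what is proved, stated in full; the proofs are below) =====
def Claim_equal_skip_to_dataset_py : Prop := ∀ (lines : List String), Dom_skip_to_dataset_py lines → Spec_skip_to_dataset_py lines (skip_to_dataset_py lines)

-- ===== LEMMAS AND PROOFS =====

-- After the first nonempty line, is_first is false and the loop can no longer change tmp.
theorem skipA_go_false (lines : List String) : ∀ tmp, skipA_go lines tmp false = tmp := by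
  induction lines with
  | nil => intro tmp; rfl
  | cons line rest ih =>
    intro tmp
    simp only [skipA_go, Bool.false_and]
    split_ifs with h1 h2 <;> simp_all

theorem skipA_go_true (lines : List String) : ∀ tmp,
    skipA_go lines tmp true = tmp ++ skip_to_dataset_py_alt lines := by
  induction lines with
  | nil => intro tmp; simp [skipA_go, skip_to_dataset_py_alt]
  | cons line rest ih =>
    intro tmp
    simp only [skipA_go, skip_to_dataset_py_alt, Bool.true_and]
    split_ifs with h1 h2 h3 h3 <;> simp [skipA_go_false, ih]

-- ===== VERDICT (by name: the statement is the Claim_ definition above) =====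
theorem skip_to_dataset_py_spec : Claim_equal_skip_to_dataset_py := by
  intro lines _
  show skip_to_dataset_py lines = skip_to_dataset_py_alt lines
  simpa using skipA_go_true lines []
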